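-- pv_equiv track=rewrite | github.com/jay-thakur/geeksforgeeks_py | practice/school/row_with_minimum_number_of_1s.py | row_of_min_1s
-- ===== SOURCE A (Python) =====
-- def row_of_min_1s(matrix, n, m):
--     r = [None] * n
--
--     for i in range(n):
--         count = 0
--         for j in range(m):
--             if matrix[i * m + j] == 1:
--                 count += 1
--         r[i] = count
--
--     if sum(r) == 0:
--         return -1
--     else:
--         mi = min(i for i in r if i > 0)
--         for i in range(len(r)):
--             if r[i] == mi:
--                 return i
--                 break
-- ===== SOURCE B (Python) =====
-- def row_of_min_1s(matrix, n, m):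
--     best_idx = -1
--     best_count = None
--     for i in range(n):
--         count = sum(1 for j in range(m) if matrix[i * m + j] == 1)
--         if count > 0 and (best_count is None or count < best_count):
--             best_idx = i
--             best_count = count
--     return best_idx
-- ===== Notes on version B (the rewrite author's own statement) =====
-- stated objective: simpler
-- what changed: A builds the full list of per-row 1-counts and then makes separate sum, min-of-positives and first-index-search passes over it; B is a single fused pass that tracks the best (index, count) pair with a strict '<' update and never materialises the list.
import Mathlib
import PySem

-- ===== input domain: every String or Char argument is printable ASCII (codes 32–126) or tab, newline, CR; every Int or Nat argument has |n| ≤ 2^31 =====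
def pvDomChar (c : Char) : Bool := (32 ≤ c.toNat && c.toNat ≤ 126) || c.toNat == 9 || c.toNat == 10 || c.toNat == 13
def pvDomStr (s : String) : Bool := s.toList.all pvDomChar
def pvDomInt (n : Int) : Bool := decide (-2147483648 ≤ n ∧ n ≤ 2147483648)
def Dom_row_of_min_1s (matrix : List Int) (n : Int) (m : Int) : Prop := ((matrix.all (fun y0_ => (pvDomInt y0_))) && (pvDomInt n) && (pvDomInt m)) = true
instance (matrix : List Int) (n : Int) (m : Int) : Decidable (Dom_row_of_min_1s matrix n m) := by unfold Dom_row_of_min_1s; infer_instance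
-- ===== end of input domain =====

-- B replaces A's build-list / sum / min-of-positives / search four-pass structure by a single
-- fused pass tracking the best (index, count) pair; return values agree on all of Pre_.

-- ===== PORT A =====
-- inner loop 'count = 0; for j in range(m): if matrix[i*m+j] == 1: count += 1'
def rowCount (matrix : List Int) (m i : Int) : Int :=
  (PySem.List.pyRange 0 m 1).foldl
    (fun count j => if PySem.List.pyGetD matrix (i * m + j) 0 == 1 then count + 1 else count) 0

-- 'for i in range(len(r)): if r[i] == mi: return i'; [] case = loop falls through
-- (Python would return None there; unreachable, since this is only called with mi ∈ r)
def rowFind (r : List Int) (mi : Int) (i : Int) : Int :=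
  match r with
  | [] => -1
  | c :: rest => if c == mi then i else rowFind rest mi (i + 1)

def row_of_min_1s (matrix : List Int) (n : Int) (m : Int) : Int :=
  let r : List Int := (PySem.List.pyRange 0 n 1).map (fun i => rowCount matrix m i)
  if r.foldl (· + ·) 0 == 0 then -1
  else
    match PySem.List.min? (r.filter (fun c => decide (0 < c))) (fun x => x) with
    | none => -1  -- unreachable: the sum is nonzero, so some nonnegative count is positive
    | some mi => rowFind r mi 0

-- ===== PORT B =====
-- 'count = sum(1 for j in range(m) if matrix[i*m+j] == 1)'
def rowCountB (matrix : List Int) (m i : Int) : Int :=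
  (PySem.List.pyRange 0 m 1).foldl
    (fun count j => count + (if PySem.List.pyGetD matrix (i * m + j) 0 == 1 then 1 else 0)) 0

def row_of_min_1s_alt (matrix : List Int) (n : Int) (m : Int) : Int :=
  ((PySem.List.pyRange 0 n 1).foldl
    (fun (st : Int × Option Int) i =>
      let count := rowCountB matrix m i
      if decide (0 < count) && (match st.2 with | none => true | some bc => decide (count < bc))
      then (i, some count) else st)
    ((-1 : Int), (none : Option Int))).1

-- ===== PRECONDITION & SPEC =====
-- Pre_ excludes exactly the inputs where the Python raises IndexError (a row index beyond
-- len(matrix), i.e. n > 0, m > 0 and n*m > len(matrix)); both programs raise there.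
def Pre_row_of_min_1s (matrix : List Int) (n : Int) (m : Int) : Prop :=
  n ≤ 0 ∨ m ≤ 0 ∨ n * m ≤ (matrix.length : Int)
instance (matrix : List Int) (n : Int) (m : Int) : Decidable (Pre_row_of_min_1s matrix n m) := by
  unfold Pre_row_of_min_1s; infer_instance

def pvWitness_row_of_min_1s : List Int × Int × Int := ([1, 0, 0, 1], 2, 2)

def Spec_row_of_min_1s (matrix : List Int) (n : Int) (m : Int) (out : Int) : Prop := out = row_of_min_1s_alt matrix n m
instance (matrix : List Int) (n : Int) (m : Int) (out : Int) : Decidable (Spec_row_of_min_1s matrix n m out) := by unfold Spec_row_of_min_1s; infer_instance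

-- ===== CLAIM (what is proved, stated in full; the proofs are below) =====
def Claim_equal_row_of_min_1s : Prop := ∀ (matrix : List Int) (n : Int) (m : Int), Dom_row_of_min_1s matrix n m → Pre_row_of_min_1s matrix n m → Spec_row_of_min_1s matrix n m (row_of_min_1s matrix n m)

-- ===== LEMMAS AND PROOFS =====

-- the two inner counting loops compute the same value
theorem rowCountB_eq (matrix : List Int) (m i : Int) :
    rowCountB matrix m i = rowCount matrix m i := by
  unfold rowCount rowCountB
  congr 1
  funext count j
  split <;> omega

theorem rowCount_nonneg (matrix : List Int) (m i : Int) : 0 ≤ rowCount matrix m i := by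
  unfold rowCount
  rw [PySem.List.foldl_if_add_one]
  positivity

-- B's step, abstracted over the per-index count function g
def bstep (g : Nat → Int) (st : Int × Option Int) (k : Nat) : Int × Option Int :=
  if decide (0 < g k) && (match st.2 with | none => true | some bc => decide (g k < bc))
  then ((k : Int), some (g k)) else st

-- the fold's invariant: either no positive count was seen, or the state is the first index
-- achieving the minimum positive count
theorem bfold_inv (g : Nat → Int) (N : Nat) :
    ((List.range N).foldl (bstep g) ((-1 : Int), (none : Option Int)) = (-1, none)
        ∧ ∀ j < N, ¬ 0 < g j)
    ∨ (∃ k v, k < N ∧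
        (List.range N).foldl (bstep g) ((-1 : Int), (none : Option Int)) = ((k : Int), some v)
        ∧ g k = v ∧ 0 < v
        ∧ (∀ j < k, 0 < g j → v < g j)
        ∧ (∀ j < N, 0 < g j → v ≤ g j)) := by
  induction N with
  | zero => exact Or.inl ⟨rfl, by omega⟩
  | succ N ih =>
    rw [List.range_succ, List.foldl_append, List.foldl_cons, List.foldl_nil]
    rcases ih with ⟨hs, hnone⟩ | ⟨k, v, hk, hs, hgv, hv, hlt, hle⟩
    · rw [hs]
      by_cases hpos : 0 < g N
      · refine Or.inr ⟨N, g N, by omega, ?_, rfl, hpos, ?_, ?_⟩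
        · simp [bstep, hpos]
        · intro j hj hgj; exact absurd hgj (hnone j hj)
        · intro j hj hgj
          have hjN : j = N := by
            by_contra hne
            exact hnone j (by omega) hgj
          rw [hjN]
      · refine Or.inl ⟨by simp [bstep, hpos], ?_⟩
        intro j hj
        by_cases hjN : j = N
        · subst hjN; exact hpos
        · exact hnone j (by omega)
    · rw [hs]
      by_cases hupd : 0 < g N ∧ g N < v
      · obtain ⟨hu1, hu2⟩ := hupd
        refine Or.inr ⟨N, g N, by omega, ?_, rfl, hu1, ?_, ?_⟩
        · simp [bstep, hu1, hu2]
        · intro j hj hgj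
          have := hle j (by omega) hgj
          omega
        · intro j hj hgj
          by_cases hjN : j = N
          · rw [hjN]
          · have := hle j (by omega) hgj; omega
      · refine Or.inr ⟨k, v, by omega, ?_, hgv, hv, hlt, ?_⟩
        · unfold bstep
          by_cases h1 : 0 < g N
          · have h2 : ¬ g N < v := by tauto
            simp [h1, h2]
          · simp [h1]
        · intro j hj hgj
          by_cases hjN : j = N
          · subst hjN; omega
          · exact hle j (by omega) hgj
  
-- a nonnegative list with a positive member has positive sum
theorem sum_pos_of_mem (l : List Int) (hnn : ∀ x ∈ l, 0 ≤ x) (v : Int) (hv : v ∈ l) :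
    v ≤ l.sum := by
  induction l with
  | nil => cases hv
  | cons c t ih =>
    rcases List.mem_cons.mp hv with h | h
    · subst h
      have : 0 ≤ t.sum := List.sum_nonneg (fun x hx => hnn x (List.mem_cons_of_mem _ hx))
      rw [List.sum_cons]; omega
    · have := ih (fun x hx => hnn x (List.mem_cons_of_mem _ hx)) h
      have hc := hnn c List.mem_cons_self
      rw [List.sum_cons]; omega

theorem min?_id_eq (l : List Int) (v : Int) (hv : v ∈ l) (hmin : ∀ y ∈ l, v ≤ y) :
    PySem.List.min? l (fun x => x) = some v := by
  cases l with
  | nil => cases hv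
  | cons x t =>
    rw [PySem.List.min?_id_cons]
    have h1 := PySem.List.foldl_min_le t x
    have hmem := PySem.List.foldl_min_mem t x
    have hle : t.foldl min x ≤ v := by
      rcases List.mem_cons.mp hv with h | h
      · subst h; exact h1.1
      · exact h1.2 v h
    have hge : v ≤ t.foldl min x := by
      rcases hmem with h | h
      · rw [h]; exact hmin x List.mem_cons_self
      · exact hmin _ (List.mem_cons_of_mem _ h)
    exact congrArg some (le_antisymm hle hge)

theorem rowFind_eq (l : List Int) (v : Int) (k : Nat) (i : Int)
    (hk : k < l.length) (hv : l[k] = v) (hb : ∀ j, (hj : j < k) → l[j]'(by omega) ≠ v) :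
    rowFind l v i = i + (k : Int) := by
  induction l generalizing k i with
  | nil => simp at hk
  | cons c t ih =>
    unfold rowFind
    by_cases hc : c = v
    · have hk0 : k = 0 := by
        by_contra h
        exact hb 0 (by omega) hc
      subst hk0
      simp [hc]
    · have hkpos : k ≠ 0 := by
        rintro rfl; simp at hv; exact hc hv
      obtain ⟨k', rfl⟩ : ∃ k', k = k' + 1 := ⟨k - 1, by omega⟩
      have : rowFind t v (i + 1) = (i + 1) + (k' : Int) := by
        apply ih _ _ (by simpa using hk) (by simpa using hv)
        intro j hj
        exact hb (j + 1) (by omega)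
      simp [hc, this]
      ring

-- the core equivalence, over an abstract nonnegative count function g on indices 0..N-1
theorem core (g : Nat → Int) (N : Nat) (hg : ∀ k, 0 ≤ g k) :
    (if ((List.range N).map g).foldl (· + ·) 0 == 0 then (-1 : Int)
     else match PySem.List.min? (((List.range N).map g).filter (fun c => decide (0 < c))) (fun x => x) with
          | none => -1
          | some mi => rowFind ((List.range N).map g) mi 0)
    = ((List.range N).foldl (bstep g) ((-1 : Int), (none : Option Int))).1 := by
  have hfs : ((List.range N).map g).foldl (· + ·) 0 = ((List.range N).map g).sum := List.sum_eq_foldl.symm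
  rw [hfs]
  rcases bfold_inv g N with ⟨hs, hnone⟩ | ⟨k, v, hk, hs, hgv, hv, hlt, hle⟩
  · rw [hs]
    have hz : ((List.range N).map g).sum = 0 := by
      apply List.sum_eq_zero
      intro x hx
      obtain ⟨j, hj, rfl⟩ := List.mem_map.mp hx
      have := hnone j (List.mem_range.mp hj)
      have := hg j
      omega
    simp [hz]
  · rw [hs]
    have hvm : v ∈ (List.range N).map g := by
      exact List.mem_map.mpr ⟨k, List.mem_range.mpr hk, hgv⟩
    have hnn : ∀ x ∈ (List.range N).map g, 0 ≤ x := by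
      intro x hx
      obtain ⟨j, _, rfl⟩ := List.mem_map.mp hx
      exact hg j
    have hsum : ¬ ((List.range N).map g).sum == 0 := by
      have := sum_pos_of_mem _ hnn v hvm
      simp only [beq_iff_eq]
      omega
    rw [if_neg (by simpa using hsum)]
    have hmin : PySem.List.min? (((List.range N).map g).filter (fun c => decide (0 < c))) (fun x => x) = some v := by
      apply min?_id_eq
      · exact List.mem_filter.mpr ⟨hvm, by simpa using hv⟩
      · intro y hy
        obtain ⟨hym, hypos⟩ := List.mem_filter.mp hy
        obtain ⟨j, hj, rfl⟩ := List.mem_map.mp hym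
        exact hle j (List.mem_range.mp hj) (by simpa using hypos)
    rw [hmin]
    have hfind : rowFind ((List.range N).map g) v 0 = 0 + (k : Int) := by
      refine rowFind_eq _ _ k _ (by simpa using hk) (by simpa using hgv) ?_
      intro j hj
      simp only [List.getElem_map, List.getElem_range]
      by_cases hpos : 0 < g j
      · have := hlt j hj hpos; omega
      · have := hg j; omega
    show rowFind (List.map g (List.range N)) v 0 = ((k : Nat) : Int)
    rw [hfind]
    omega

theorem pyRange_zero_n (n : Int) :
    PySem.List.pyRange 0 n 1 = (List.range n.toNat).map (fun k : Nat => (k : Int)) := by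
  rw [PySem.List.pyRange_one]
  simp only [Int.sub_zero, zero_add]

theorem row_of_min_1s_spec' (matrix : List Int) (n : Int) (m : Int) :
    row_of_min_1s matrix n m = row_of_min_1s_alt matrix n m := by
  unfold row_of_min_1s row_of_min_1s_alt
  rw [pyRange_zero_n, List.foldl_map, List.map_map]
  simp only [Function.comp_def, rowCountB_eq]
  exact core (fun k : Nat => rowCount matrix m (k : Int)) n.toNat
    (fun k => rowCount_nonneg matrix m (k : Int))

-- ===== VERDICT (by name: the statement is the Claim_ definition above) =====
theorem row_of_min_1s_spec : Claim_equal_row_of_min_1s := by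
  intro matrix n m _ _
  unfold Spec_row_of_min_1s
  exact row_of_min_1s_spec' matrix n m
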